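-- pv_equiv track=rewrite | github.com/beatrizmaiar/Teste-de-competencia-em-programacao | Competência 1/ex2.py | conta_pares
-- ===== SOURCE A (Python) =====
-- def conta_pares(n, lista_de_botas):
--     pares = 0
--     tamanhos_direito = {}
--     for bota in lista_de_botas:
--         tamanho, pe = bota
--         if pe == "D":
--             if tamanho in tamanhos_direito:
--                 tamanhos_direito[tamanho] += 1
--             else:
--                 tamanhos_direito[tamanho] = 1
--         else:
--             if tamanho in tamanhos_direito:
--                 pares += 1
--                 tamanhos_direito[tamanho] -= 1
--     return pares
-- ===== SOURCE B (Python) =====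
-- def conta_pares(n, lista_de_botas):
--     por_tamanho = {}
--     for tamanho, pe in lista_de_botas:
--         por_tamanho.setdefault(tamanho, []).append(pe)
--     pares = 0
--     for pes in por_tamanho.values():
--         disponiveis = 0
--         for pe in pes:
--             if pe == "D":
--                 disponiveis += 1
--             elif disponiveis > 0:
--                 pares += 1
--                 disponiveis -= 1
--     return pares
-- ===== Notes on version B (the rewrite author's own statement) =====
-- stated objective: alternative
-- what changed: B groups the boots by size first (dict of side-lists) and then scans each size group with a plain availability counter that actually consumes a right boot per pair, instead of A's single interleaved pass over a counter dict whose membership test never checks the count.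
-- intended difference: On lists where some non-'D' (left) boot is preceded by a right boot of its size but every such right boot is already used up by earlier left boots, A still counts a pair for it (its 'tamanho in dict' test ignores the exhausted counter), while B pairs each right boot with at most one left boot; B's count of disjoint left/right pairs is the intended value. — e.g. on conta_pares(0, [(1, "D"), (1, "E"), (1, "E")]): A returns 2, B returns 1
import Mathlib
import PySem

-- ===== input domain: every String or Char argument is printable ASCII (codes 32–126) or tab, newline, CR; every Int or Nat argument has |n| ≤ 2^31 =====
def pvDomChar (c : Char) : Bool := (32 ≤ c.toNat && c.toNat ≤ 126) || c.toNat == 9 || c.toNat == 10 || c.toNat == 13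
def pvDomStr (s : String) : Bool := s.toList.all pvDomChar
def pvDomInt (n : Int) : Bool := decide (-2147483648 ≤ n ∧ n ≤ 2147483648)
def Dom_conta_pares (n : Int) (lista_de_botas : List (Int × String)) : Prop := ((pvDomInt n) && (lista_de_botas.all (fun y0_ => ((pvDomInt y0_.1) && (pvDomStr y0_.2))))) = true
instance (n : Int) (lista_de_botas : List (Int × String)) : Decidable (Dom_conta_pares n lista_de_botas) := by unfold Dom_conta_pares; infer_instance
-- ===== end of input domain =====

-- B groups the boots by size and pairs greedily, consuming one right boot per pair; A's
-- membership test never checks its counter, so on the inputs described by D_ A over-counts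
-- and B returns the intended number of disjoint pairs ('alternative'; A = B outside D_).

-- ===== PORT A =====
-- loop body of A: state (pares, tamanhos_direito)
def pvAStep (st : Int × PySem.Dict Int Int) (bota : Int × String) : Int × PySem.Dict Int Int :=
  let pares := st.1
  let d := st.2
  let tamanho := bota.1
  let pe := bota.2
  if pe == "D" then
    if d.contains tamanho then (pares, d.insert tamanho (d.getD tamanho 0 + 1))
    else (pares, d.insert tamanho 1)
  else
    if d.contains tamanho then (pares + 1, d.insert tamanho (d.getD tamanho 0 - 1))
    else (pares, d)

def conta_pares (n : Int) (lista_de_botas : List (Int × String)) : Int :=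
  (lista_de_botas.foldl pvAStep ((0 : Int), (PySem.Dict.empty : PySem.Dict Int Int))).1

-- ===== PORT B =====
-- first loop of B: por_tamanho.setdefault(tamanho, []).append(pe)
def pvGroupStep (por_tamanho : PySem.Dict Int (List String)) (bota : Int × String) :
    PySem.Dict Int (List String) :=
  let tamanho := bota.1
  let pe := bota.2
  por_tamanho.modify tamanho [] (· ++ [pe])

-- inner loop of B: state (pares, disponiveis)
def pvPairStep (st : Int × Int) (pe : String) : Int × Int :=
  let pares := st.1
  let disponiveis := st.2
  if pe == "D" then (pares, disponiveis + 1)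
  else if disponiveis > 0 then (pares + 1, disponiveis - 1)
  else (pares, disponiveis)

def conta_pares_alt (n : Int) (lista_de_botas : List (Int × String)) : Int :=
  let por_tamanho :=
    lista_de_botas.foldl pvGroupStep (PySem.Dict.empty : PySem.Dict Int (List String))
  por_tamanho.values.foldl (fun pares pes => (pes.foldl pvPairStep (pares, 0)).1) 0

-- ===== PRECONDITION & SPEC =====
-- b is a left boot, a right boot of its size occurs in the prefix p, yet every suffix of p
-- holds at least as many left (non-"D") as right boots of that size (all rights consumed)
def pvBad (p : List (Int × String)) (b : Int × String) : Prop :=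
  b.2 ≠ "D" ∧ (b.1, "D") ∈ p ∧ ∀ q ∈ p.tails, 2 * q.count (b.1, "D") ≤ q.countP (·.1 == b.1)

-- On lists where some non-'D' (left) boot is preceded by a right boot of its size but every
-- such right boot is already used up by earlier left boots, A still counts a pair for it (its
-- membership test ignores the exhausted counter), while B pairs each right boot with at most
-- one left boot; B's count of disjoint pairs is the intended value.
def D_conta_pares (n : Int) (lista_de_botas : List (Int × String)) : Prop :=
  ∃ p ∈ lista_de_botas.inits, pvBad p.dropLast (p.getLastD (0, ""))
instance (n : Int) (lista_de_botas : List (Int × String)) : Decidable (D_conta_pares n lista_de_botas) := by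
  unfold D_conta_pares pvBad; infer_instance

def Spec_conta_pares (n : Int) (lista_de_botas : List (Int × String)) (out : Int) : Prop := ¬ D_conta_pares n lista_de_botas → out = conta_pares_alt n lista_de_botas
instance (n : Int) (lista_de_botas : List (Int × String)) (out : Int) : Decidable (Spec_conta_pares n lista_de_botas out) := by unfold Spec_conta_pares; infer_instance

def pvDiffWitness_conta_pares : Int × (List (Int × String)) := (0, [(1, "D"), (1, "E"), (1, "E")])
def pvDiffWitnessOut_conta_pares : Int × Int := (2, 1)

-- ===== CLAIM (what is proved, stated in full; the proofs are below) =====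
def Claim_unchanged_conta_pares : Prop := ∀ (n : Int) (lista_de_botas : List (Int × String)), Dom_conta_pares n lista_de_botas → Spec_conta_pares n lista_de_botas (conta_pares n lista_de_botas)
def Claim_changed_conta_pares : Prop := Dom_conta_pares (pvDiffWitness_conta_pares.1) (pvDiffWitness_conta_pares.2) ∧ D_conta_pares (pvDiffWitness_conta_pares.1) (pvDiffWitness_conta_pares.2) ∧ conta_pares (pvDiffWitness_conta_pares.1) (pvDiffWitness_conta_pares.2) = pvDiffWitnessOut_conta_pares.1 ∧ conta_pares_alt (pvDiffWitness_conta_pares.1) (pvDiffWitness_conta_pares.2) = pvDiffWitnessOut_conta_pares.2 ∧ pvDiffWitnessOut_conta_pares.1 ≠ pvDiffWitnessOut_conta_pares.2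
def Claim_exact_conta_pares : Prop := ∀ (n : Int) (lista_de_botas : List (Int × String)), Dom_conta_pares n lista_de_botas → D_conta_pares n lista_de_botas → conta_pares n lista_de_botas ≠ conta_pares_alt n lista_de_botas

-- ===== LEMMAS AND PROOFS =====

-- A's semantics: count left boots whose size is `seen` (a right boot occurred before)
def pvSeenCount (seen : Int → Bool) : List (Int × String) → Int
  | [] => 0
  | b :: rest =>
    if b.2 == "D" then pvSeenCount (fun x => x == b.1 || seen x) rest
    else (if seen b.1 then 1 else 0) + pvSeenCount seen rest

-- B's semantics, interleaved: greedy matching with per-size availability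
def pvMatch (disp : Int → Int) : List (Int × String) → Int
  | [] => 0
  | b :: rest =>
    if b.2 == "D" then pvMatch (fun x => if x = b.1 then disp x + 1 else disp x) rest
    else if disp b.1 > 0 then 1 + pvMatch (fun x => if x = b.1 then disp x - 1 else disp x) rest
    else pvMatch disp rest

-- a step where A counts but B has no right boot available
def pvLost (seen : Int → Bool) (disp : Int → Int) : List (Int × String) → Bool
  | [] => false
  | b :: rest =>
    if b.2 == "D" then pvLost (fun x => x == b.1 || seen x) (fun x => if x = b.1 then disp x + 1 else disp x) rest
    else if seen b.1 && decide (disp b.1 ≤ 0) then true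
    else if disp b.1 > 0 then pvLost seen (fun x => if x = b.1 then disp x - 1 else disp x) rest
    else pvLost seen disp rest

-- B's per-size inner scan
def pvGreedy (d : Int) : List String → Int
  | [] => 0
  | pe :: r => if pe == "D" then pvGreedy (d + 1) r
    else if d > 0 then 1 + pvGreedy (d - 1) r
    else pvGreedy d r

-- availability for size t after processing prefix p from nothing
def pvDisp (t : Int) (p : List (Int × String)) : Int :=
  p.foldl (fun d b => if b.1 == t && b.2 == "D" then d + 1
    else if b.1 == t then (if d > 0 then d - 1 else d) else d) 0

def pvSeenOf (p : List (Int × String)) (t : Int) : Bool := decide ((t, "D") ∈ p)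

-- ---- A's loop counts pvSeenCount of the dict's current key set ----
theorem pvA_loop (xs : List (Int × String)) : ∀ (pares : Int) (d : PySem.Dict Int Int),
    (xs.foldl pvAStep (pares, d)).1 = pares + pvSeenCount (fun x => d.contains x) xs := by
  induction xs with
  | nil => intro pares d; simp [pvSeenCount]
  | cons b rest ih =>
    intro pares d
    simp only [List.foldl_cons, pvAStep, pvSeenCount]
    by_cases hD : (b.2 == "D") = true
    · simp only [hD, if_true]
      by_cases hc : d.contains b.1 = true
      · simp only [hc, if_true, ih]
        congr 2
        funext x
        simp [PySem.Dict.contains_insert]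
      · simp only [hc, if_false, Bool.false_eq_true, ih]
        congr 2
        funext x
        simp [PySem.Dict.contains_insert]
    · simp only [hD, if_false, Bool.false_eq_true]
      by_cases hc : d.contains b.1 = true
      · simp only [hc, if_true, ih]
        have hseen : (fun x => (d.insert b.1 (d.getD b.1 0 - 1)).contains x)
            = (fun x => d.contains x) := by
          funext x
          rw [PySem.Dict.contains_insert]
          by_cases hx : x = b.1
          · subst hx; simp [hc]
          · simp [hx]
        rw [hseen]
        ring
      · simp only [hc, if_false, Bool.false_eq_true, ih]
        simp

-- ---- B's port equals pvMatch ----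
theorem pvPair_loop (pes : List String) : ∀ (pares d : Int),
    (pes.foldl pvPairStep (pares, d)).1 = pares + pvGreedy d pes := by
  induction pes with
  | nil => intro pares d; simp [pvGreedy]
  | cons pe r ih =>
    intro pares d
    simp only [List.foldl_cons, pvPairStep, pvGreedy]
    by_cases hD : (pe == "D") = true
    · simp [hD, ih]
    · simp only [hD, if_false, Bool.false_eq_true]
      by_cases hp : d > 0
      · simp only [hp, if_true, ih]; ring
      · simp [hp, ih]

def pvGroup (t : Int) (xs : List (Int × String)) : List String :=
  (xs.filter (fun b => b.1 == t)).map (·.2)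

-- updating the sum of a map over a list with distinct elements at one member
theorem pvMapSumUpdate (S : List Int) (t : Int) (f g : Int → Int) (c : Int) :
    S.Nodup → t ∈ S → f t = c + g t → (∀ u ∈ S, u ≠ t → f u = g u) →
    (S.map f).sum = c + (S.map g).sum := by
  induction S with
  | nil => intro _ h; simp at h
  | cons a S ih =>
    intro hnd hmem hft hne
    rcases List.mem_cons.1 hmem with rfl | hmem'
    · have hrest : ∀ u ∈ S, f u = g u := by
        intro u hu
        exact hne u (List.mem_cons_of_mem _ hu) (fun h => (List.nodup_cons.1 hnd).1 (h ▸ hu))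
      simp only [List.map_cons, List.sum_cons, hft, List.map_congr_left hrest]
      ring
    · have : (S.map f).sum = c + (S.map g).sum :=
        ih (List.nodup_cons.1 hnd).2 hmem' hft (fun u hu => hne u (List.mem_cons_of_mem _ hu))
      have hfa : f a = g a := hne a List.mem_cons_self
        (fun h => (List.nodup_cons.1 hnd).1 (h ▸ hmem'))
      simp only [List.map_cons, List.sum_cons, hfa, this]
      ring

theorem pvGroupedMatch (xs : List (Int × String)) : ∀ (S : List Int) (disp : Int → Int),
    S.Nodup → (∀ b ∈ xs, b.1 ∈ S) →
    (S.map (fun t => pvGreedy (disp t) (pvGroup t xs))).sum = pvMatch disp xs := by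
  induction xs with
  | nil =>
    intro S disp _ _
    simp [pvMatch, pvGroup, pvGreedy]
  | cons b xs ih =>
    intro S disp hnd hcov
    have hbS : b.1 ∈ S := hcov b List.mem_cons_self
    have hcov' : ∀ b' ∈ xs, b'.1 ∈ S := fun b' h => hcov b' (List.mem_cons_of_mem _ h)
    have hgrp_t : pvGroup b.1 (b :: xs) = b.2 :: pvGroup b.1 xs := by
      simp [pvGroup]
    have hgrp_ne : ∀ u, u ≠ b.1 → pvGroup u (b :: xs) = pvGroup u xs := by
      intro u hu
      simp only [pvGroup, List.filter_cons]
      have : (b.1 == u) = false := by simpa using fun h => hu h.symm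
      simp [this]
    simp only [pvMatch]
    by_cases hD : (b.2 == "D") = true
    · rw [if_pos hD, ← ih S (fun x => if x = b.1 then disp x + 1 else disp x) hnd hcov']
      have h := pvMapSumUpdate S b.1
        (fun t => pvGreedy (disp t) (pvGroup t (b :: xs)))
        (fun t => pvGreedy (if t = b.1 then disp t + 1 else disp t) (pvGroup t xs)) 0 hnd hbS
        (by simp only [hgrp_t]; simp [pvGreedy, hD])
        (by intro u hu hne; simp only [hgrp_ne u hne]; simp [hne])
      linarith [h]
    · rw [if_neg hD]
      by_cases hp : disp b.1 > 0
      · rw [if_pos hp, ← ih S (fun x => if x = b.1 then disp x - 1 else disp x) hnd hcov']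
        have h := pvMapSumUpdate S b.1
          (fun t => pvGreedy (disp t) (pvGroup t (b :: xs)))
          (fun t => pvGreedy (if t = b.1 then disp t - 1 else disp t) (pvGroup t xs)) 1 hnd hbS
          (by simp only [hgrp_t]; simp [pvGreedy, hD, hp])
          (by intro u hu hne; simp only [hgrp_ne u hne]; simp [hne])
        linarith [h]
      · rw [if_neg hp, ← ih S disp hnd hcov']
        have h := pvMapSumUpdate S b.1
          (fun t => pvGreedy (disp t) (pvGroup t (b :: xs)))
          (fun t => pvGreedy (disp t) (pvGroup t xs)) 0 hnd hbS
          (by simp only [hgrp_t]; simp [pvGreedy, hD, hp])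
          (by intro u hu hne; simp only [hgrp_ne u hne])
        linarith [h]

theorem pvAlt_eq_match (n : Int) (xs : List (Int × String)) :
    conta_pares_alt n xs = pvMatch (fun _ => 0) xs := by
  have hstep : pvGroupStep = (fun d (p : Int × String) => d.modify p.1 [] (· ++ [p.2])) := rfl
  unfold conta_pares_alt
  rw [hstep]
  have hkeys : (xs.foldl (fun d p => d.modify p.1 [] (· ++ [p.2]))
      (PySem.Dict.empty : PySem.Dict Int (List String))).keys
      = PySem.Set.ofList (xs.map (·.1)) := by
    rw [PySem.Dict.keys_foldl_modify_key xs (·.1) [] (fun _ p => (· ++ [p.2]))]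
    simp [PySem.Set.update_nil_left]
  have hnd : (xs.foldl (fun d p => d.modify p.1 [] (· ++ [p.2]))
      (PySem.Dict.empty : PySem.Dict Int (List String))).keys.Nodup := by
    rw [hkeys]; exact PySem.Set.nodup_ofList _
  have hvals : (xs.foldl (fun d p => d.modify p.1 [] (· ++ [p.2]))
      (PySem.Dict.empty : PySem.Dict Int (List String))).values
      = (PySem.Set.ofList (xs.map (·.1))).map (fun t => pvGroup t xs) := by
    rw [PySem.Dict.values_eq_map_keys _ hnd [], hkeys]
    apply List.map_congr_left
    intro t _
    rw [PySem.Dict.getD_foldl_modify_append]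
    simp [pvGroup, PySem.Dict.getD_empty]
  simp only [hvals]
  have hfold : ∀ (L : List (List String)) (a : Int),
      L.foldl (fun pares pes => (pes.foldl pvPairStep (pares, 0)).1) a
        = a + (L.map (fun pes => pvGreedy 0 pes)).sum := by
    intro L
    induction L with
    | nil => intro a; simp
    | cons pes L ihL =>
      intro a
      rw [List.foldl_cons, pvPair_loop, ihL]
      simp only [List.map_cons, List.sum_cons]
      ring
  rw [hfold]
  rw [List.map_map]
  have := pvGroupedMatch xs (PySem.Set.ofList (xs.map (·.1))) (fun _ => 0)
    (PySem.Set.nodup_ofList _)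
    (fun b hb => (PySem.Set.mem_ofList _ _).2 (List.mem_map_of_mem hb))
  simp only [Function.comp_def] at this ⊢
  rw [this]
  ring

-- ---- comparison of pvSeenCount and pvMatch via pvLost ----
theorem pvMatch_le_seen (xs : List (Int × String)) :
    ∀ (seen : Int → Bool) (disp : Int → Int),
    (∀ t, 0 ≤ disp t) → (∀ t, 0 < disp t → seen t = true) →
    pvMatch disp xs ≤ pvSeenCount seen xs := by
  induction xs with
  | nil => intro seen disp _ _; simp [pvMatch, pvSeenCount]
  | cons b xs ih =>
    intro seen disp h0 hinv
    simp only [pvMatch, pvSeenCount]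
    by_cases hD : (b.2 == "D") = true
    · rw [if_pos hD, if_pos hD]
      apply ih
      · intro t; by_cases ht : t = b.1 <;> simp [ht] <;> [linarith [h0 b.1]; exact h0 t]
      · intro t hp
        by_cases ht : t = b.1
        · simp [ht]
        · simp only [if_neg ht] at hp
          simp [hinv t hp, ht]
    · rw [if_neg hD, if_neg hD]
      by_cases hp : disp b.1 > 0
      · rw [if_pos hp]
        have hseen : seen b.1 = true := hinv b.1 hp
        rw [hseen, if_pos rfl]
        have : pvMatch (fun x => if x = b.1 then disp x - 1 else disp x) xs
            ≤ pvSeenCount seen xs := by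
          apply ih
          · intro t; by_cases ht : t = b.1 <;> simp [ht] <;> [linarith; exact h0 t]
          · intro t hpt
            by_cases ht : t = b.1
            · exact ht ▸ hseen
            · simp only [if_neg ht] at hpt
              exact hinv t hpt
        linarith
      · rw [if_neg hp]
        have : pvMatch disp xs ≤ pvSeenCount seen xs := ih seen disp h0 hinv
        by_cases hs : seen b.1 = true <;> simp [hs] <;> linarith

theorem pvMaster (xs : List (Int × String)) :
    ∀ (seen : Int → Bool) (disp : Int → Int),
    (∀ t, 0 ≤ disp t) → (∀ t, 0 < disp t → seen t = true) →
    (pvLost seen disp xs = true → pvMatch disp xs < pvSeenCount seen xs) ∧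
    (pvLost seen disp xs = false → pvMatch disp xs = pvSeenCount seen xs) := by
  induction xs with
  | nil => intro seen disp _ _; simp [pvLost, pvMatch, pvSeenCount]
  | cons b xs ih =>
    intro seen disp h0 hinv
    simp only [pvLost, pvMatch, pvSeenCount]
    by_cases hD : (b.2 == "D") = true
    · simp only [if_pos hD]
      apply ih
      · intro t; by_cases ht : t = b.1 <;> simp [ht] <;> [linarith [h0 b.1]; exact h0 t]
      · intro t hp
        by_cases ht : t = b.1
        · simp [ht]
        · simp only [if_neg ht] at hp
          simp [hinv t hp, ht]
    · simp only [if_neg hD]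
      by_cases hlost : (seen b.1 && decide (disp b.1 ≤ 0)) = true
      · have hseen : seen b.1 = true := (Bool.and_eq_true _ _ ▸ hlost).1
        have hle : disp b.1 ≤ 0 := of_decide_eq_true (Bool.and_eq_true _ _ ▸ hlost).2
        have hp : ¬ disp b.1 > 0 := by linarith
        rw [if_pos hlost, if_neg hp, hseen]
        have hone : (if (true : Bool) = true then (1 : Int) else 0) = 1 := by simp
        rw [hone]
        constructor
        · intro _
          have hms := pvMatch_le_seen xs seen disp h0 hinv
          linarith
        · intro h
          exact absurd h (by simp)
      · rw [if_neg hlost]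
        by_cases hp : disp b.1 > 0
        · have hseen : seen b.1 = true := hinv b.1 hp
          rw [if_pos hp, if_pos hp, hseen]
          have hone : (if (true : Bool) = true then (1 : Int) else 0) = 1 := by simp
          rw [hone]
          have hrec := ih seen (fun x => if x = b.1 then disp x - 1 else disp x)
            (by intro t; by_cases ht : t = b.1 <;> simp [ht] <;> [linarith; exact h0 t])
            (by
              intro t hpt
              by_cases ht : t = b.1
              · exact ht ▸ hseen
              · simp only [if_neg ht] at hpt
                exact hinv t hpt)
          constructor
          · intro h; have := hrec.1 h; linarith
          · intro h; have := hrec.2 h; linarith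
        · have hseen : seen b.1 = false := by
            by_contra hs
            have hstrue : seen b.1 = true := by
              cases h : seen b.1
              · exact absurd h hs
              · rfl
            apply hlost
            simp [hstrue, show disp b.1 ≤ 0 by linarith]
          rw [if_neg hp, if_neg hp, hseen]
          have hzero : (if (false : Bool) = true then (1 : Int) else 0) = 0 := by simp
          rw [hzero]
          have hrec := ih seen disp h0 hinv
          constructor
          · intro h; have := hrec.1 h; linarith
          · intro h; have := hrec.2 h; linarith

-- ---- characterisation of pvDisp by suffix counts ----
theorem pvDisp_nonneg (p : List (Int × String)) (t : Int) : 0 ≤ pvDisp t p := by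
  unfold pvDisp
  suffices h : ∀ (q : List (Int × String)) (d : Int), 0 ≤ d →
      0 ≤ q.foldl (fun d b => if b.1 == t && b.2 == "D" then d + 1
        else if b.1 == t then (if d > 0 then d - 1 else d) else d) d by
    exact h p 0 le_rfl
  intro q
  induction q with
  | nil => intro d hd; simpa using hd
  | cons b q ihq =>
    intro d hd
    simp only [List.foldl_cons]
    apply ihq
    split_ifs with h1 h2 h3 <;> omega

theorem pvDisp_append (p : List (Int × String)) (b : Int × String) (t : Int) :
    pvDisp t (p ++ [b]) = (if b.1 == t && b.2 == "D" then pvDisp t p + 1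
      else if b.1 == t then (if pvDisp t p > 0 then pvDisp t p - 1 else pvDisp t p)
      else pvDisp t p) := by
  unfold pvDisp
  rw [List.foldl_append]
  rfl

-- right-minus-left balance of boots of size t (proof-side view of pvBad's count condition)
def pvBal (t : Int) (q : List (Int × String)) : Int :=
  (q.map fun b => if b.1 == t then if b.2 == "D" then (1 : Int) else -1 else 0).sum

theorem pvBal_cons (t : Int) (c : Int × String) (q : List (Int × String)) :
    pvBal t (c :: q)
      = (if c.1 == t then if c.2 == "D" then (1 : Int) else -1 else 0) + pvBal t q := by
  simp [pvBal]

theorem pvBal_eq (t : Int) (q : List (Int × String)) :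
    pvBal t q = 2 * (q.count (t, "D") : Int) - (q.countP (fun x => x.1 == t) : Int) := by
  induction q with
  | nil => simp [pvBal]
  | cons c q ih =>
    rcases c with ⟨c1, c2⟩
    by_cases h1 : c1 = t <;> by_cases h2 : c2 = "D" <;>
      simp [pvBal_cons, List.count_cons, List.countP_cons, h1, h2, ih, Prod.ext_iff] <;>
      push_cast <;> omega

theorem pvBad_iff_bal (p : List (Int × String)) (b : Int × String) :
    pvBad p b ↔ (b.2 ≠ "D" ∧ (b.1, "D") ∈ p ∧ ∀ j ≤ p.length, pvBal b.1 (p.drop j) ≤ 0) := by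
  unfold pvBad
  apply and_congr_right
  intro _
  apply and_congr_right
  intro _
  constructor
  · intro h j hj
    have := h (p.drop j) ((List.mem_tails _ _).2 (List.drop_suffix j p))
    rw [pvBal_eq]
    omega
  · intro h q hq
    rw [List.mem_tails _ _] at hq
    obtain ⟨r, hr⟩ := hq
    have hq' : q = p.drop r.length := by rw [← hr, List.drop_left]
    have hlen : r.length ≤ p.length := by rw [← hr]; simp
    have := h r.length hlen
    rw [pvBal_eq, ← hq'] at this
    omega

theorem pvBal_append (t : Int) (q : List (Int × String)) (b : Int × String) :
    pvBal t (q ++ [b]) = pvBal t q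
      + (if b.1 == t then (if b.2 == "D" then (1 : Int) else -1) else 0) := by
  simp [pvBal]

theorem pvDisp_char (p : List (Int × String)) (t : Int) : ∀ (c : Int), 0 ≤ c →
    (pvDisp t p ≤ c ↔ ∀ j ≤ p.length, pvBal t (p.drop j) ≤ c) := by
  induction p using List.reverseRecOn with
  | nil =>
    intro c hc
    constructor
    · intro _ j hj
      have hj0 : j = 0 := by simpa using hj
      subst hj0
      simp [pvBal]
      omega
    · intro h
      simpa [pvDisp] using h 0 (by simp)
  | append_singleton p b ihp =>
    intro c hc
    have hdrop : ∀ j, j ≤ p.length → (p ++ [b]).drop j = p.drop j ++ [b] := by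
      intro j hj
      rw [List.drop_append_of_le_length hj]
    have hdroplast : (p ++ [b]).drop (p.length + 1) = [] := by
      rw [List.drop_eq_nil_iff]
      simp
    have hlen : (p ++ [b]).length = p.length + 1 := by simp
    rw [pvDisp_append]
    by_cases hbt : (b.1 == t) = true
    · by_cases hbD : (b.2 == "D") = true
      · -- a right boot of size t at the end
        have hcond : (b.1 == t && b.2 == "D") = true := by simp [hbt, hbD]
        rw [if_pos hcond]
        have hstep : ∀ q, pvBal t (q ++ [b]) = pvBal t q + 1 := by
          intro q
          rw [pvBal_append, if_pos hbt, if_pos hbD]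
        constructor
        · intro h j hj
          rw [hlen] at hj
          rcases Nat.lt_or_ge j (p.length + 1) with hj' | hj'
          · have hj'' : j ≤ p.length := by omega
            rw [hdrop j hj'', hstep]
            have hc1 : (0:Int) ≤ c - 1 := by
              have := pvDisp_nonneg p t
              omega
            have := (ihp (c-1) hc1).1 (by omega) j hj''
            omega
          · have hje : j = p.length + 1 := by omega
            rw [hje, hdroplast]
            simp [pvBal]
            omega
        · intro h
          have hlast := h p.length (by omega)
          rw [hdrop p.length le_rfl, List.drop_length, List.nil_append] at hlast
          have hb1 : pvBal t [b] = 1 := by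
            have := hstep []
            simpa [pvBal] using this
          rw [hb1] at hlast
          rw [show pvDisp t p + 1 ≤ c ↔ pvDisp t p ≤ c - 1 by omega]
          rw [ihp (c-1) (by omega)]
          intro j hj
          have := h j (by omega)
          rw [hdrop j hj, hstep] at this
          omega
      · -- a left boot of size t at the end
        have hcond : ¬ ((b.1 == t && b.2 == "D") = true) := by
          simp [hbt]
          simpa using hbD
        rw [if_neg hcond, if_pos hbt]
        have hstep : ∀ q, pvBal t (q ++ [b]) = pvBal t q + (-1) := by
          intro q
          rw [pvBal_append, if_pos hbt, if_neg hbD]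
        have hnn := pvDisp_nonneg p t
        have hif : (if pvDisp t p > 0 then pvDisp t p - 1 else pvDisp t p) ≤ c
            ↔ pvDisp t p ≤ c + 1 := by
          split_ifs with hgt <;> omega
        rw [hif, ihp (c+1) (by omega)]
        constructor
        · intro h j hj
          rw [hlen] at hj
          rcases Nat.lt_or_ge j (p.length + 1) with hj' | hj'
          · have hj'' : j ≤ p.length := by omega
            rw [hdrop j hj'', hstep]
            have := h j hj''
            omega
          · have hje : j = p.length + 1 := by omega
            rw [hje, hdroplast]
            simp [pvBal]
            omega
        · intro h j hj
          have := h j (by omega)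
          rw [hdrop j hj, hstep] at this
          omega
    · -- a boot of another size at the end
      have hcond : ¬ ((b.1 == t && b.2 == "D") = true) := by simp [hbt]
      rw [if_neg hcond, if_neg hbt]
      have hstep : ∀ q, pvBal t (q ++ [b]) = pvBal t q := by
        intro q
        rw [pvBal_append, if_neg hbt]
        omega
      rw [ihp c hc]
      constructor
      · intro h j hj
        rw [hlen] at hj
        rcases Nat.lt_or_ge j (p.length + 1) with hj' | hj'
        · have hj'' : j ≤ p.length := by omega
          rw [hdrop j hj'', hstep]
          exact h j hj''
        · have hje : j = p.length + 1 := by omega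
          rw [hje, hdroplast]
          simp [pvBal]
          omega
      · intro h j hj
        have := h j (by omega)
        rw [hdrop j hj, hstep] at this
        exact this

-- pvBad pre b (for a left boot b) says exactly: seen and no availability left
theorem pvBad_iff (pre : List (Int × String)) (b : Int × String) (hE : (b.2 == "D") = false) :
    pvBad pre b ↔ (pvSeenOf pre b.1 = true ∧ pvDisp b.1 pre ≤ 0) := by
  rw [pvBad_iff_bal]
  unfold pvSeenOf
  have hchar := pvDisp_char pre b.1 0 le_rfl
  constructor
  · rintro ⟨-, hmem, hbal⟩
    exact ⟨by simpa using hmem, hchar.2 hbal⟩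
  · rintro ⟨hmem, hdisp⟩
    exact ⟨by simpa using hE, by simpa using hmem, hchar.1 hdisp⟩

-- pvLost from the state after prefix p ⟺ some later left boot is 'bad'
theorem pvLost_iff (xs : List (Int × String)) : ∀ (p : List (Int × String)),
    pvLost (pvSeenOf p) (fun t => pvDisp t p) xs = true ↔
    ∃ i ∈ List.range xs.length, pvBad (p ++ xs.take i) (xs.getD i (0, "")) := by
  induction xs with
  | nil => intro p; simp [pvLost]
  | cons b xs ih =>
    intro p
    have hshift : (∃ i ∈ List.range xs.length, pvBad ((p ++ [b]) ++ xs.take i) (xs.getD i (0, "")))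
        ↔ (∃ i ∈ List.range (xs.length), pvBad (p ++ (b :: xs).take (i+1)) ((b :: xs).getD (i+1) (0, ""))) := by
      constructor <;> rintro ⟨i, hi, hbad⟩ <;> exact ⟨i, hi, by simpa [List.append_assoc] using hbad⟩
    have hsplit : (∃ i ∈ List.range (b :: xs).length, pvBad (p ++ (b :: xs).take i) ((b :: xs).getD i (0, "")))
        ↔ (pvBad p b ∨ ∃ i ∈ List.range (xs.length), pvBad (p ++ (b :: xs).take (i+1)) ((b :: xs).getD (i+1) (0, ""))) := by
      constructor
      · rintro ⟨i, hi, hbad⟩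
        cases i with
        | zero => left; simpa using hbad
        | succ i' =>
          right
          exact ⟨i', by simp at hi ⊢; omega, hbad⟩
      · rintro (hbad | ⟨i, hi, hbad⟩)
        · exact ⟨0, by simp, by simpa using hbad⟩
        · exact ⟨i + 1, by simp at hi ⊢; omega, hbad⟩
    simp only [pvLost]
    by_cases hD : (b.2 == "D") = true
    · rw [if_pos hD]
      have hb : b = (b.1, "D") := by
        have : b.2 = "D" := by simpa using hD
        exact Prod.ext rfl this
      have hseen' : (fun x => x == b.1 || pvSeenOf p x) = pvSeenOf (p ++ [b]) := by
        funext x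
        unfold pvSeenOf
        rw [hb]
        simp [List.mem_append, Prod.ext_iff, eq_comm, Bool.or_comm, Bool.beq_eq_decide_eq]
      have hdisp' : (fun x => if x = b.1 then pvDisp x p + 1 else pvDisp x p)
          = (fun t => pvDisp t (p ++ [b])) := by
        funext x
        rw [pvDisp_append]
        by_cases hx : x = b.1
        · simp [hx, hD]
        · have : (b.1 == x) = false := by simpa using fun h => hx h.symm
          simp [hx, this]
      rw [hseen', hdisp', ih (p ++ [b]), hshift, hsplit]
      have hnotbad : ¬ pvBad p b := by
        rintro ⟨hne, -, -⟩
        exact hne (by simpa using hD)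
      tauto
    · rw [if_neg hD]
      have hDf : (b.2 == "D") = false := by simpa using hD
      have hbadiff := pvBad_iff p b hDf
      by_cases hlost : (pvSeenOf p b.1 && decide (pvDisp b.1 p ≤ 0)) = true
      · rw [if_pos hlost]
        have hbad : pvBad p b := hbadiff.2
          ⟨(Bool.and_eq_true _ _ ▸ hlost).1, of_decide_eq_true (Bool.and_eq_true _ _ ▸ hlost).2⟩
        simp only [true_iff]
        rw [hsplit]
        exact Or.inl hbad
      · rw [if_neg hlost]
        have hnotbad : ¬ pvBad p b := by
          intro hbad
          obtain ⟨h1, h2⟩ := hbadiff.1 hbad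
          exact hlost (by simp [h1, h2])
        have hseen' : pvSeenOf p = pvSeenOf (p ++ [b]) := by
          funext x
          unfold pvSeenOf
          have : (x, "D") ≠ b := by
            intro h
            rw [← h] at hDf
            simp at hDf
          simp [List.mem_append, this]
        have hnn := pvDisp_nonneg p
        by_cases hp : pvDisp b.1 p > 0
        · rw [if_pos hp]
          have hdisp' : (fun x => if x = b.1 then pvDisp x p - 1 else pvDisp x p)
              = (fun t => pvDisp t (p ++ [b])) := by
            funext x
            rw [pvDisp_append]
            by_cases hx : x = b.1
            · simp [hx, hDf, hp]
            · have : (b.1 == x) = false := by simpa using fun h => hx h.symm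
              simp [hx, this]
          rw [hseen', hdisp', ih (p ++ [b]), hshift, hsplit]
          tauto
        · rw [if_neg hp]
          have hdisp' : (fun t => pvDisp t p) = (fun t => pvDisp t (p ++ [b])) := by
            funext x
            rw [pvDisp_append]
            by_cases hx : x = b.1
            · have : pvDisp x p = 0 := by have := hnn x; rw [hx] at *; omega
              simp [hx, hDf, hp, this]
            · have : (b.1 == x) = false := by simpa using fun h => hx h.symm
              simp [hx, this]
          rw [hseen', hdisp', ih (p ++ [b]), hshift, hsplit]
          tauto

-- bridge between the index form of "some later left boot is bad" and D_'s prefix form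
theorem pvD_bridge (xs : List (Int × String)) :
    (∃ i < xs.length, pvBad (List.take i xs) (xs[i]?.getD (0, ""))) ↔
    (∃ p, p <+: xs ∧ pvBad p.dropLast (p.getLastD (0, ""))) := by
  constructor
  · rintro ⟨i, hi, hbad⟩
    refine ⟨xs.take (i+1), List.take_prefix _ _, ?_⟩
    have h1 : (xs.take (i+1)).dropLast = xs.take i := by
      rw [List.dropLast_eq_take, List.length_take, List.take_take]
      congr 1
      omega
    have h2 : (xs.take (i+1)).getLastD (0, "") = xs[i]?.getD (0, "") := by
      rw [List.getLastD_eq_getLast?, List.getLast?_eq_getElem?, List.length_take]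
      have hm : min (i+1) xs.length - 1 = i := by omega
      rw [hm]
      rw [List.getElem?_take_of_lt (by omega)]
    rw [h1, h2]
    exact hbad
  · rintro ⟨p, hp, hbad⟩
    obtain ⟨r, rfl⟩ := hp
    rcases p.eq_nil_or_concat with rfl | ⟨q, b, rfl⟩
    · rcases hbad with ⟨-, hmem, -⟩
      simp at hmem
    · rw [List.concat_eq_append] at hbad ⊢
      have h3 : (q ++ [b]).dropLast = q := by simp
      have h4 : (q ++ [b]).getLastD (0, "") = b := by
        rw [List.getLastD_eq_getLast?, List.getLast?_concat]
        rfl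
      rw [h3, h4] at hbad
      refine ⟨q.length, by simp, ?_⟩
      have h1 : ((q ++ [b]) ++ r).take q.length = q := by
        rw [List.append_assoc]
        have := List.take_left (l₁ := q) (l₂ := [b] ++ r)
        simpa using this
      have h2 : ((q ++ [b]) ++ r)[q.length]? = some b := by
        rw [List.append_assoc, List.getElem?_append_right le_rfl]
        simp
      rw [h1, h2]
      exact hbad

-- top-level: pvLost from the empty state decides D_
theorem pvLost_iff_D (n : Int) (xs : List (Int × String)) :
    pvLost (pvSeenOf []) (fun t => pvDisp t []) xs = true ↔ D_conta_pares n xs := by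
  rw [pvLost_iff xs []]
  unfold D_conta_pares
  simp only [List.nil_append, List.mem_range, List.mem_inits, List.getD_eq_getElem?_getD]
  exact pvD_bridge xs

theorem pvInit_seen : (fun x : Int => (PySem.Dict.empty : PySem.Dict Int Int).contains x) = pvSeenOf [] := by
  funext x
  simp [PySem.Dict.contains_empty, pvSeenOf]

theorem pvInit_disp : (fun _ : Int => (0 : Int)) = (fun t => pvDisp t []) := by
  funext t
  simp [pvDisp]

theorem pvA_eq_seen (n : Int) (xs : List (Int × String)) :
    conta_pares n xs = pvSeenCount (pvSeenOf []) xs := by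
  unfold conta_pares
  rw [pvA_loop, pvInit_seen]
  ring

theorem pvB_eq_match (n : Int) (xs : List (Int × String)) :
    conta_pares_alt n xs = pvMatch (fun t => pvDisp t []) xs := by
  rw [pvAlt_eq_match, pvInit_disp]

theorem pvInvariants : (∀ t : Int, 0 ≤ pvDisp t []) ∧
    (∀ t : Int, 0 < pvDisp t [] → pvSeenOf [] t = true) := by
  constructor
  · intro t; simp [pvDisp]
  · intro t h; simp [pvDisp] at h

-- ===== VERDICT (by name: the statement is the Claim_ definition above) =====
theorem conta_pares_spec : Claim_unchanged_conta_pares := by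
  intro n xs _
  intro hnd
  rw [pvA_eq_seen, pvB_eq_match]
  have hlost : pvLost (pvSeenOf []) (fun t => pvDisp t []) xs = false := by
    cases h : pvLost (pvSeenOf []) (fun t => pvDisp t []) xs
    · rfl
    · exact absurd ((pvLost_iff_D n xs).1 h) hnd
  exact ((pvMaster xs (pvSeenOf []) (fun t => pvDisp t []) pvInvariants.1 pvInvariants.2).2 hlost).symm

theorem conta_pares_changed : Claim_changed_conta_pares := by
  unfold Claim_changed_conta_pares; decide

theorem conta_pares_tight : Claim_exact_conta_pares := by
  intro n xs _ hd
  rw [pvA_eq_seen, pvB_eq_match]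
  have hlost : pvLost (pvSeenOf []) (fun t => pvDisp t []) xs = true := (pvLost_iff_D n xs).2 hd
  have := (pvMaster xs (pvSeenOf []) (fun t => pvDisp t []) pvInvariants.1 pvInvariants.2).1 hlost
  omega
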